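-- pv_equiv track=rewrite | github.com/linus123/PythonPractice | src/110103_TheTrip/TheTrip.py | balance_money
-- ===== SOURCE A (Python) =====
-- def balance_money(amounts):
--     grand_total = get_sum(amounts)
--
--     average = grand_total // len(amounts)
--
--     adjusted_amounts = create_list_of_amount(average, len(amounts))
--
--     running_total = average * len(amounts)
--
--     index = 0
--
--     while running_total < grand_total:
--         adjusted_amounts[index] += 1
--         running_total += 1
--         index += 1
--
--     return adjusted_amounts
--
-- def get_sum(amounts):
--     total = 0
--
--     for amount in amounts:
--         total += amount
--
--     return total
--
-- def create_list_of_amount(amount, length):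
--     final = []
--
--     for index in range(0, length):
--         final.append(amount)
--
--     return final
-- ===== SOURCE B (Python) =====
-- def balance_money(amounts):
--     total = sum(amounts)
--     return [-((i - total) // len(amounts)) for i in range(len(amounts))]
-- ===== Notes on version B (the rewrite author's own statement) =====
-- stated objective: alternative
-- what changed: Replaces A's even-split-plus-incrementing-while-loop with a per-position closed formula: element i is the ceiling of (total - i)/n, computed as -((i - total)//n), with no quotient/remainder split and no mutation.
import Mathlib
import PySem

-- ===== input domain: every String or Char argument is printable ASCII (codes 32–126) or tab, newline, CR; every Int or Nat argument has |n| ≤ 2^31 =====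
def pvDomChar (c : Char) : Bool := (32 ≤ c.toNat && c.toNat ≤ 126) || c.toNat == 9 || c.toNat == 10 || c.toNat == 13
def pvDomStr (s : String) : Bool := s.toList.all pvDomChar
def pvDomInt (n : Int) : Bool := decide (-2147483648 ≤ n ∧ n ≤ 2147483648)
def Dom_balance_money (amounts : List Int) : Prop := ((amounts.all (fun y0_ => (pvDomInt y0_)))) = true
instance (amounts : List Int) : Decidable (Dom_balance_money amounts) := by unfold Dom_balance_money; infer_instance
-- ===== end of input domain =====

-- B replaces A's even-split + incrementing while loop by a per-position ceiling formula
-- (element i = ceil((total - i)/n), written -((i - total)//n)); objective: alternative.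

-- ===== PORT A =====
-- get_sum: explicit accumulator loop
def pvGetSum (amounts : List Int) : Int := amounts.foldl (fun total amount => total + amount) 0

-- create_list_of_amount: append in a loop over range(0, length)
def pvCreateList (amount : Int) (length : Nat) : List Int :=
  (List.range length).foldl (fun final _ => final ++ [amount]) []

-- the while loop: 'while running_total < grand_total: adjusted[index] += 1; running_total += 1; index += 1'
-- (List.modify is exact here: inside Pre_ the index never leaves the list)
def pvBalLoop (adjusted : List Int) (running grand : Int) (index : Nat) : List Int :=
  if running < grand then
    pvBalLoop (adjusted.modify index (· + 1)) (running + 1) grand (index + 1)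
  else adjusted
termination_by (grand - running).toNat
decreasing_by omega

def balance_money (amounts : List Int) : List Int :=
  let grand_total := pvGetSum amounts
  let average := PySem.Int.floordiv grand_total amounts.length
  let adjusted_amounts := pvCreateList average amounts.length
  let running_total := average * amounts.length
  pvBalLoop adjusted_amounts running_total grand_total 0

-- ===== PORT B =====
def balance_money_alt (amounts : List Int) : List Int :=
  let total := amounts.sum
  (PySem.List.pyRange 0 amounts.length 1).map
    (fun i => -(PySem.Int.floordiv (i - total) amounts.length))

-- ===== PRECONDITION & SPEC =====
-- A raises ZeroDivisionError on the empty list; Pre_ excludes exactly that.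
def Pre_balance_money (amounts : List Int) : Prop := amounts ≠ []
instance (amounts : List Int) : Decidable (Pre_balance_money amounts) := by
  unfold Pre_balance_money; infer_instance
def pvWitness_balance_money : List Int := [7, -3, 4]

def Spec_balance_money (amounts : List Int) (out : List Int) : Prop := out = balance_money_alt amounts
instance (amounts : List Int) (out : List Int) : Decidable (Spec_balance_money amounts out) := by
  unfold Spec_balance_money; infer_instance

-- ===== CLAIM (what is proved, stated in full; the proofs are below) =====
def Claim_equal_balance_money : Prop := ∀ (amounts : List Int), Dom_balance_money amounts → Pre_balance_money amounts → Spec_balance_money amounts (balance_money amounts)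

-- ===== LEMMAS AND PROOFS =====

theorem pvCreateList_eq_replicate (amount : Int) (length : Nat) :
    pvCreateList amount length = List.replicate length amount := by
  unfold pvCreateList
  induction length with
  | zero => rfl
  | succ k ih =>
    rw [List.range_succ, List.foldl_append]
    simp [ih, List.replicate_succ']

theorem pvModifyAppendLen {α : Type} (f : α → α) : ∀ (l1 : List α) (a : α) (t : List α),
    (l1 ++ a :: t).modify l1.length f = l1 ++ f a :: t := by
  intro l1
  induction l1 with
  | nil => intro a t; simp
  | cons x xs ih => intro a t; simpa using ih a t

theorem pvBalLoop_spec (m : Nat) : ∀ (l1 l2 : List Int) (running : Int),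
    m ≤ l2.length →
    pvBalLoop (l1 ++ l2) running (running + m) l1.length
      = l1 ++ (l2.take m).map (· + 1) ++ l2.drop m := by
  induction m with
  | zero =>
    intro l1 l2 running _
    rw [pvBalLoop]
    simp
  | succ k ih =>
    intro l1 l2 running hm
    match l2 with
    | [] => simp at hm
    | a :: t =>
      rw [pvBalLoop]
      have hlt : running < running + (↑(k + 1) : Int) := by push_cast; omega
      rw [if_pos hlt]
      have hmod : (l1 ++ a :: t).modify l1.length (· + 1) = (l1 ++ [a + 1]) ++ t := by
        rw [pvModifyAppendLen]
        simp
      rw [hmod]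
      have harg : running + (↑(k + 1) : Int) = (running + 1) + k := by push_cast; ring
      have hlen : l1.length + 1 = (l1 ++ [a + 1]).length := by simp
      rw [harg, hlen, ih (l1 ++ [a + 1]) t (running + 1) (by simpa using Nat.succ_le_succ_iff.mp hm)]
      simp

-- A's result, in closed form: remainder many (q+1)'s then q's.
theorem balance_money_closed (amounts : List Int) (h : amounts ≠ []) :
    balance_money amounts =
      List.replicate (PySem.Int.mod amounts.sum amounts.length).toNat
          (PySem.Int.floordiv amounts.sum amounts.length + 1)
        ++ List.replicate (amounts.length - (PySem.Int.mod amounts.sum amounts.length).toNat)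
          (PySem.Int.floordiv amounts.sum amounts.length) := by
  unfold balance_money pvGetSum
  have hsum : amounts.foldl (fun total amount => total + amount) 0 = amounts.sum := by
    rw [List.sum_eq_foldl]
  rw [hsum]
  have hn : 0 < (amounts.length : Int) := by
    simp only [Int.natCast_pos]
    exact List.length_pos_iff.mpr h
  set q : Int := PySem.Int.floordiv amounts.sum (amounts.length : Int) with hq
  set r : Int := PySem.Int.mod amounts.sum (amounts.length : Int) with hr
  have hdm : q * (amounts.length : Int) + r = amounts.sum := PySem.Int.floordiv_mul_add_mod _ _
  have hr0 : 0 ≤ r := PySem.Int.mod_nonneg amounts.sum hn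
  have hrlt : r < (amounts.length : Int) := PySem.Int.mod_lt amounts.sum hn
  have hgr : amounts.sum = q * (amounts.length : Int) + (r.toNat : Int) := by omega
  have hrn : r.toNat ≤ amounts.length := by omega
  show pvBalLoop (pvCreateList q amounts.length) (q * (amounts.length : Int)) amounts.sum 0
      = List.replicate r.toNat (q + 1) ++ List.replicate (amounts.length - r.toNat) q
  rw [pvCreateList_eq_replicate, hgr]
  have := pvBalLoop_spec r.toNat ([] : List Int) (List.replicate amounts.length q)
      (q * (amounts.length : Int)) (by simpa using hrn)
  simp only [List.nil_append, List.length_nil] at this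
  rw [this]
  rw [List.take_replicate, List.drop_replicate, Nat.min_eq_left hrn]
  simp only [List.map_replicate]

theorem balance_money_spec_aux (amounts : List Int) (h : amounts ≠ []) :
    balance_money amounts = balance_money_alt amounts := by
  rw [balance_money_closed amounts h]
  unfold balance_money_alt
  have hn : 0 < (amounts.length : Int) := by
    simp only [Int.natCast_pos]
    exact List.length_pos_iff.mpr h
  set n : Int := (amounts.length : Int) with hnd
  set q : Int := PySem.Int.floordiv amounts.sum n with hq
  set r : Int := PySem.Int.mod amounts.sum n with hr
  have hdm : q * n + r = amounts.sum := PySem.Int.floordiv_mul_add_mod _ _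
  have hr0 : 0 ≤ r := PySem.Int.mod_nonneg amounts.sum hn
  have hrlt : r < n := PySem.Int.mod_lt amounts.sum hn
  apply List.ext_getElem
  · simp [PySem.List.length_pyRange_one]
    omega
  · intro k hk1 hk2
    rw [List.getElem_map, PySem.List.getElem_pyRange_one]
    have hkn : (k : Int) < n := by
      have := hk2
      simp [PySem.List.length_pyRange_one] at this
      omega
    have hfd : PySem.Int.floordiv (0 + (k : Int) - amounts.sum) n
        = if (k : Int) < r then -(q + 1) else -q := by
      split
      · rw [PySem.Int.floordiv_eq_iff_of_pos hn]
        constructor <;> nlinarith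
      · rw [PySem.Int.floordiv_eq_iff_of_pos hn]
        constructor <;> nlinarith
    rw [hfd]
    by_cases hkr : (k : Int) < r
    · rw [if_pos hkr]
      have hkr' : k < r.toNat := by omega
      rw [List.getElem_append_left (by simpa using hkr')]
      simp
    · rw [if_neg hkr]
      have hkr' : r.toNat ≤ k := by omega
      rw [List.getElem_append_right (by simpa using hkr')]
      simp

-- ===== VERDICT (by name: the statement is the Claim_ definition above) =====
theorem balance_money_spec : Claim_equal_balance_money := by
  intro amounts _ hpre
  exact balance_money_spec_aux amounts hpre
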